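-- pv_equiv track=rewrite | github.com/antonegas/kattis | session1/train_sorting.py | train_sorting
-- ===== SOURCE A (Python) =====
-- def train_sorting(sq: list[int]):
--     res = 0
--
--     for i, c in enumerate(sq):
--         lo = c
--         hi = c
--         l = 1
--         for v in sq[i+1:]:
--             if lo > v:
--                 lo = v
--                 l += 1
--             elif hi < v:
--                 hi = v
--                 l += 1
--
--         if l > res:
--             res = l
--
--     return res
-- ===== SOURCE B (Python) =====
-- def train_sorting(sq: list[int]):
--     # O(n) right-to-left pass: two monotonic stacks hold the left-to-right
--     # strict minima / maxima of the current suffix; the answer for a start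
--     # element c is 1 + (records below c) + (records above c).
--     low = []   # strict left-to-right minima of the suffix, top of stack = largest
--     high = []  # strict left-to-right maxima of the suffix, top of stack = smallest
--     best = 0
--     for c in reversed(sq):
--         while low and low[-1] >= c:
--             low.pop()
--         while high and high[-1] <= c:
--             high.pop()
--         l = 1 + len(low) + len(high)
--         if l > best:
--             best = l
--         low.append(c)
--         high.append(c)
--     return best
-- ===== Notes on version B (the rewrite author's own statement) =====
-- stated objective: faster
-- what changed: Replaced the per-start rescan of the whole suffix by a single right-to-left pass with two monotonic stacks holding the strict running minima/maxima of the current suffix, so each start's chain length is read off as 1 + the two stack sizes.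
import Mathlib
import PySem

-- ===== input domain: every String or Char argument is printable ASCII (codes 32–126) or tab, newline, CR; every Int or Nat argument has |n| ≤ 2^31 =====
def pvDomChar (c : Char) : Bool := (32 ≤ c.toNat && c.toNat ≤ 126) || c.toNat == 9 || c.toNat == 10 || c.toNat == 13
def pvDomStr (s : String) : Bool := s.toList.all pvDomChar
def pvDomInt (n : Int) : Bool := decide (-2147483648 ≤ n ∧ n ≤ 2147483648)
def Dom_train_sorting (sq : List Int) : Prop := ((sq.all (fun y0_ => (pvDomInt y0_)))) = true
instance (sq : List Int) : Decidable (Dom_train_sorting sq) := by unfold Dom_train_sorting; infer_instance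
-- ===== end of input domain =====

-- B replaces A's quadratic per-start rescan by one right-to-left pass with two
-- monotonic stacks (strict running minima/maxima of the suffix); same result, O(n).

-- ===== PORT A =====
-- inner loop of A: state (lo, hi, l)
def tsInner (st : Int × Int × Int) (v : Int) : Int × Int × Int :=
  if st.1 > v then (v, st.2.1, st.2.2 + 1)
  else if st.2.1 < v then (st.1, v, st.2.2 + 1)
  else st

def train_sorting (sq : List Int) : Int :=
  (PySem.List.enumerate sq).foldl
    (fun res ic =>
      let l := ((PySem.List.slice sq (some (ic.1 + 1)) none).foldl tsInner (ic.2, ic.2, 1)).2.2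
      if l > res then l else res) 0

-- ===== PORT B =====
-- one step of B's loop over reversed(sq); stacks are lists with head = top
def tsStep (st : List Int × List Int × Int) (c : Int) : List Int × List Int × Int :=
  let low := st.1.dropWhile (fun x => decide (x ≥ c))    -- the while-pop loop
  let high := st.2.1.dropWhile (fun x => decide (x ≤ c)) -- the while-pop loop
  let l : Int := 1 + low.length + high.length
  (c :: low, c :: high, if l > st.2.2 then l else st.2.2)

def train_sorting_alt (sq : List Int) : Int :=
  (sq.reverse.foldl tsStep ([], [], 0)).2.2

-- ===== PRECONDITION & SPEC =====
def Spec_train_sorting (sq : List Int) (out : Int) : Prop := out = train_sorting_alt sq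
instance (sq : List Int) (out : Int) : Decidable (Spec_train_sorting sq out) := by unfold Spec_train_sorting; infer_instance

-- ===== CLAIM (what is proved, stated in full; the proofs are below) =====
def Claim_equal_train_sorting : Prop := ∀ (sq : List Int), Dom_train_sorting sq → Spec_train_sorting sq (train_sorting sq)

-- ===== LEMMAS AND PROOFS =====

-- number of strict new minima / maxima met scanning t with seed c
def cntLow : Int → List Int → Int
  | _, [] => 0
  | c, v :: t => if v < c then 1 + cntLow v t else cntLow c t

def cntHigh : Int → List Int → Int
  | _, [] => 0
  | c, v :: t => if v > c then 1 + cntHigh v t else cntHigh c t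

-- per-suffix chain lengths, head = value for the first element
def vals : List Int → List Int
  | [] => []
  | c :: t => (1 + cntLow c t + cntHigh c t) :: vals t

-- the strict left-to-right minima / maxima record stacks of a list (head = first record)
def lowRecs : List Int → List Int
  | [] => []
  | c :: t => c :: (lowRecs t).dropWhile (fun x => decide (x ≥ c))

def highRecs : List Int → List Int
  | [] => []
  | c :: t => c :: (highRecs t).dropWhile (fun x => decide (x ≤ c))

-- A's inner fold computes l + cntLow + cntHigh
theorem inner_eq (t : List Int) : ∀ (lo hi l : Int), lo ≤ hi →
    (t.foldl tsInner (lo, hi, l)).2.2 = l + cntLow lo t + cntHigh hi t := by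
  induction t with
  | nil => intro lo hi l _; simp [cntLow, cntHigh]
  | cons v t ih =>
    intro lo hi l hle
    simp only [List.foldl_cons, tsInner, cntLow, cntHigh]
    by_cases h1 : lo > v
    · have : ¬ v > hi := by omega
      simp [h1, this, ih v hi (l+1) (by omega)]
      ring
    · by_cases h2 : hi < v
      · have : ¬ v < lo := by omega
        simp [h1, h2, ih lo v (l+1) (by omega)]
        ring
      · have e1 : ¬ v < lo := by omega
        have e2 : ¬ v > hi := by omega
        simp [h1, h2, ih lo hi l hle]

theorem dropWhile_dropWhile {p q : Int → Bool} (l : List Int)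
    (h : ∀ x, q x = true → p x = true) :
    (l.dropWhile q).dropWhile p = l.dropWhile p := by
  induction l with
  | nil => rfl
  | cons x t ih =>
    by_cases hq : q x = true
    · have hp := h x hq
      simp [hq, hp, ih]
    · rw [List.dropWhile_cons, if_neg hq, List.dropWhile_cons]

-- the stack after popping counts exactly the strict records below / above c
theorem len_dropWhile_lowRecs (t : List Int) : ∀ c : Int,
    ((lowRecs t).dropWhile (fun x => decide (x ≥ c))).length = cntLow c t := by
  induction t with
  | nil => intro c; simp [lowRecs, cntLow]
  | cons v t ih =>
    intro c
    simp only [lowRecs, cntLow]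
    by_cases h : v < c
    · rw [List.dropWhile_cons, if_neg (by simpa using (by omega : ¬ v ≥ c))]
      simp [ih v]
      split <;> omega
    · rw [List.dropWhile_cons, if_pos (by simpa using (by omega : v ≥ c)),
        dropWhile_dropWhile _ (by intro x hx; simp at hx ⊢; omega)]
      simp [h, ih c]

theorem len_dropWhile_highRecs (t : List Int) : ∀ c : Int,
    ((highRecs t).dropWhile (fun x => decide (x ≤ c))).length = cntHigh c t := by
  induction t with
  | nil => intro c; simp [highRecs, cntHigh]
  | cons v t ih =>
    intro c
    simp only [highRecs, cntHigh]
    by_cases h : v > c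
    · rw [List.dropWhile_cons, if_neg (by simpa using (by omega : ¬ v ≤ c))]
      simp [ih v]
      split <;> omega
    · rw [List.dropWhile_cons, if_pos (by simpa using (by omega : v ≤ c)),
        dropWhile_dropWhile _ (by intro x hx; simp at hx ⊢; omega)]
      simp [h, ih c]

-- right-to-left maximum of vals
def maxR : List Int → Int
  | [] => 0
  | x :: t => if x > maxR t then x else maxR t

theorem maxR_nonneg (l : List Int) : 0 ≤ maxR l := by
  induction l with
  | nil => simp [maxR]
  | cons x t ih => simp only [maxR]; split <;> omega

-- B's fold invariant
theorem alt_inv (t : List Int) :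
    t.reverse.foldl tsStep ([], [], 0) = (lowRecs t, highRecs t, maxR (vals t)) := by
  induction t with
  | nil => simp [lowRecs, highRecs, vals, maxR]
  | cons c t ih =>
    simp only [List.reverse_cons, List.foldl_append, ih, List.foldl_cons, List.foldl_nil,
      tsStep, lowRecs, highRecs, vals, maxR]
    rw [len_dropWhile_lowRecs, len_dropWhile_highRecs]

theorem enum_fold (t : List Int) : ∀ (pre : List Int) (res : Int), 0 ≤ res →
    (PySem.List.enumerate t (pre.length : Int)).foldl
      (fun res ic =>
        let l := ((PySem.List.slice (pre ++ t) (some (ic.1 + 1)) none).foldl tsInner (ic.2, ic.2, 1)).2.2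
        if l > res then l else res) res
    = max res (maxR (vals t)) := by
  induction t with
  | nil => intro pre res hres; simp [PySem.List.enumerate, vals, maxR]; omega
  | cons c t ih =>
    intro pre res hres
    rw [PySem.List.enumerate_cons, List.foldl_cons]
    have hslice : PySem.List.slice (pre ++ c :: t) (some ((pre.length : Int) + 1)) none = t := by
      have : ((pre.length : Int) + 1) = ((pre.length + 1 : Nat) : Int) := by push_cast; ring
      rw [this, PySem.List.slice_from_natCast,
        show pre ++ c :: t = (pre ++ [c]) ++ t by simp,
        show pre.length + 1 = (pre ++ [c]).length by simp]
      exact List.drop_left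
    simp only [hslice]
    have harr : ((pre.length : Int) + 1) = (((pre ++ [c]).length : Nat) : Int) := by
      simp
    rw [harr]
    have hpre : pre ++ c :: t = (pre ++ [c]) ++ t := by simp
    rw [show (fun (res : Int) (ic : Int × Int) =>
        let l := ((PySem.List.slice (pre ++ c :: t) (some (ic.1 + 1)) none).foldl tsInner (ic.2, ic.2, 1)).2.2
        if l > res then l else res)
      = (fun (res : Int) (ic : Int × Int) =>
        let l := ((PySem.List.slice ((pre ++ [c]) ++ t) (some (ic.1 + 1)) none).foldl tsInner (ic.2, ic.2, 1)).2.2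
        if l > res then l else res) from by rw [← hpre]]
    have hinner := inner_eq t c c 1 le_rfl
    have hval : ((t.foldl tsInner (c, c, 1)).2.2) = 1 + cntLow c t + cntHigh c t := hinner
    simp only [hval]
    rw [ih (pre ++ [c]) _ (by split <;> omega)]
    simp only [vals, maxR]
    split <;> split <;> omega

-- ===== VERDICT (by name: the statement is the Claim_ definition above) =====
theorem train_sorting_spec : Claim_equal_train_sorting := by
  intro sq _
  unfold Spec_train_sorting train_sorting train_sorting_alt
  rw [alt_inv]
  have h := enum_fold sq [] 0 le_rfl
  simp only [List.nil_append, List.length_nil, Nat.cast_zero] at h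
  rw [show (PySem.List.enumerate sq : List (Int × Int)) = PySem.List.enumerate sq 0 from rfl, h]
  have := maxR_nonneg (vals sq)
  simp
  omega
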